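-- pv_equiv track=rewrite | github.com/psp515/IntroductionToComputerScience | Z2/Programs/utils.py | look_in_fib_for_draft
-- ===== SOURCE A (Python) =====
-- def get_fibb_by_index(index):
--     if index == 0:
--         return 0
--     if index == 1:
--         return 1
--     return get_fibb_by_index(index-1) + get_fibb_by_index(index-2)
--
-- def look_in_fib_for_draft(number):
--     if number == 0: return True
--     end_counter = 0 # upper limit for searching draft
--     end_fibo = 0
--     while end_fibo < number:
--         end_counter += 1
--         end_fibo = get_fibb_by_index(end_counter)
--
--         # Below is searching function it searches if draft exist
--         searching_fibbo = 0
--         searching_counter = 0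
--         while searching_fibbo < end_fibo:
--             searching_fibbo = get_fibb_by_index(searching_counter)
--             if end_fibo - searching_fibbo == number:
--                 return True
--             searching_counter += 1
--     return False
-- ===== SOURCE B (Python) =====
-- def look_in_fib_for_draft(number):
--     if number <= 0:
--         return number == 0
--     fibs = {0}
--     a, b = 0, 1
--     while b < number:
--         fibs.add(b)
--         a, b = b, a + b
--     fibs.add(b)
--     return b - number in fibs
-- ===== Notes on version B (the rewrite author's own statement) =====
-- stated objective: faster
-- what changed: Replaces the exponential recursive Fibonacci recomputation inside two nested scanning loops by one iterative pass that builds the Fibonacci numbers up to the first one >= number into a set and answers with a single set lookup.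
import Mathlib
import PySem

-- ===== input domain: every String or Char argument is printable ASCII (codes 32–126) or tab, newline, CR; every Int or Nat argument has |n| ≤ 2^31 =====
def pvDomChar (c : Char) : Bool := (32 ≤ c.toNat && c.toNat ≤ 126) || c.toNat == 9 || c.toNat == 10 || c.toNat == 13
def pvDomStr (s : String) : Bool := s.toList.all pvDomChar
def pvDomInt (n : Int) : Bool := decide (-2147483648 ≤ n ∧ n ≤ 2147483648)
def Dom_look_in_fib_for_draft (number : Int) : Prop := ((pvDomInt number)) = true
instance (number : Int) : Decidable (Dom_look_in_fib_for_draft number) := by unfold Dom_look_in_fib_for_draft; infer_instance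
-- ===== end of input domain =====

-- B replaces A's exponential recursive Fibonacci recomputation inside two nested scanning
-- loops by one iterative pass collecting the Fibonacci numbers up to the first one ≥ number
-- into a set, answering with a single lookup (objective: faster).

-- ===== PORT A =====
-- get_fibb_by_index: naive double recursion. A only calls it with nonnegative indices
-- (its counters start at 0 and only increase); the port recurses on index.toNat, which is
-- exact for every such call (Python would recurse forever on a negative index).
def pvFibNat : Nat → Int
  | 0 => 0
  | 1 => 1
  | n + 2 => pvFibNat (n + 1) + pvFibNat n

def get_fibb_by_index (index : Int) : Int := pvFibNat index.toNat

-- inner 'while searching_fibbo < end_fibo' loop; fuel makes it total, the caller passes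
-- enough fuel (proved in the lemmas) so the 0-case is never reached on the inputs claimed
def pvSearchLoop (number end_fibo searching_fibbo : Int) (searching_counter : Nat) : Nat → Bool
  | 0 => false
  | fuel + 1 =>
    if searching_fibbo < end_fibo then
      let s := get_fibb_by_index (searching_counter : Int)
      if end_fibo - s == number then true
      else pvSearchLoop number end_fibo s (searching_counter + 1) fuel
    else false

-- outer 'while end_fibo < number' loop
def pvOuterLoop (number : Int) (end_counter : Nat) (end_fibo : Int) : Nat → Bool
  | 0 => false
  | fuel + 1 =>
    if end_fibo < number then
      let ec := end_counter + 1
      let ef := get_fibb_by_index (ec : Int)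
      if pvSearchLoop number ef 0 0 (ef.toNat + 2) then true
      else pvOuterLoop number ec ef fuel
    else false

def look_in_fib_for_draft (number : Int) : Bool :=
  if number == 0 then true
  else pvOuterLoop number 0 0 (number.toNat + 2)

-- ===== PORT B =====
-- 'while b < number: fibs.add(b); a, b = b, a + b' loop of Source B (fuel as above)
def pvFibLoop (number : Int) (fibs : PySem.Set Int) (a b : Int) : Nat → Int × PySem.Set Int
  | 0 => (b, fibs)
  | fuel + 1 =>
    if b < number then pvFibLoop number (PySem.Set.add fibs b) b (a + b) fuel
    else (b, fibs)

def look_in_fib_for_draft_alt (number : Int) : Bool :=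
  if number ≤ 0 then number == 0
  else
    let r := pvFibLoop number (PySem.Set.ofList [0]) 0 1 (number.toNat + 2)
    PySem.Set.contains (PySem.Set.add r.2 r.1) (r.1 - number)

-- ===== PRECONDITION & SPEC =====
def Spec_look_in_fib_for_draft (number : Int) (out : Bool) : Prop := out = look_in_fib_for_draft_alt number
instance (number : Int) (out : Bool) : Decidable (Spec_look_in_fib_for_draft number out) := by unfold Spec_look_in_fib_for_draft; infer_instance

-- ===== CLAIM (what is proved, stated in full; the proofs are below) =====
def Claim_equal_look_in_fib_for_draft : Prop := ∀ (number : Int), Dom_look_in_fib_for_draft number → Spec_look_in_fib_for_draft number (look_in_fib_for_draft number)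

-- ===== LEMMAS AND PROOFS =====

theorem pvFib_nonneg : ∀ n, 0 ≤ pvFibNat n := by
  intro n
  induction n using pvFibNat.induct with
  | case1 => simp [pvFibNat]
  | case2 => simp [pvFibNat]
  | case3 n ih1 ih2 => simp only [pvFibNat]; omega

theorem pvFib_mono_succ : ∀ n, pvFibNat n ≤ pvFibNat (n + 1) := by
  intro n
  induction n using pvFibNat.induct with
  | case1 => simp [pvFibNat]
  | case2 => simp [pvFibNat]
  | case3 n ih1 ih2 =>
    show pvFibNat (n + 2) ≤ pvFibNat (n + 3)
    have h := pvFib_nonneg (n + 1)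
    simp only [pvFibNat]
    have h2 := pvFib_nonneg n
    omega

theorem pvFib_mono {i j : Nat} (h : i ≤ j) : pvFibNat i ≤ pvFibNat j := by
  induction j with
  | zero => simp_all
  | succ j ih =>
    rcases Nat.lt_or_ge i (j + 1) with h' | h'
    · exact le_trans (ih (by omega)) (pvFib_mono_succ j)
    · have : i = j + 1 := by omega
      simp [this]

theorem pvFib_ge_aux : ∀ n : Nat, (n : Int) ≤ pvFibNat (n + 1) ∧ 1 ≤ pvFibNat (n + 1) := by
  intro n
  induction n using pvFibNat.induct with
  | case1 => exact ⟨by simp [pvFibNat], by simp [pvFibNat]⟩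
  | case2 => exact ⟨by simp [pvFibNat], by simp [pvFibNat]⟩
  | case3 n ih1 ih2 =>
    have e : pvFibNat (n + 2 + 1) = pvFibNat (n + 1 + 1) + pvFibNat (n + 1) := rfl
    obtain ⟨a1, a2⟩ := ih1
    obtain ⟨b1, b2⟩ := ih2
    refine ⟨?_, ?_⟩
    · show ((n + 2 : Nat) : Int) ≤ pvFibNat (n + 2 + 1)
      push_cast
      omega
    · show (1 : Int) ≤ pvFibNat (n + 2 + 1)
      omega

theorem pvFib_ge (n : Nat) : (n : Int) ≤ pvFibNat (n + 1) := (pvFib_ge_aux n).1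

theorem pvGet_natCast (c : Nat) : get_fibb_by_index (c : Int) = pvFibNat c := by
  simp [get_fibb_by_index]

-- the inner loop only returns true when some Fibonacci number is end_fibo - number
theorem pvSearch_sound (number F : Int) :
    ∀ (fuel : Nat) (s : Int) (c : Nat),
      pvSearchLoop number F s c fuel = true → ∃ k, F - pvFibNat k = number := by
  intro fuel
  induction fuel with
  | zero => intro s c h; simp [pvSearchLoop] at h
  | succ fuel ih =>
    intro s c h
    simp only [pvSearchLoop, pvGet_natCast] at h
    split at h
    · split at h
      · next heq => exact ⟨c, by simpa using heq⟩
      · exact ih _ _ h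
    · simp at h

-- the inner loop finds any Fibonacci number equal to F - number
theorem pvSearch_complete (number F : Int) (hn : 1 ≤ number) (k : Nat)
    (hk : F - pvFibNat k = number) :
    ∀ (fuel : Nat) (c : Nat) (s : Int),
      F ≤ pvFibNat (c + fuel) → s < F → c ≤ k →
      pvSearchLoop number F s c fuel = true := by
  intro fuel
  induction fuel with
  | zero =>
    intro c s hfuel hs hck
    exfalso
    have h1 : pvFibNat c ≤ pvFibNat k := pvFib_mono hck
    simp only [Nat.add_zero] at hfuel
    omega
  | succ fuel ih =>
    intro c s hfuel hs hck
    simp only [pvSearchLoop, pvGet_natCast]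
    rw [if_pos hs]
    by_cases hc : F - pvFibNat c == number
    · simp [hc]
    · rw [if_neg (by simpa using hc)]
      have hcne : c ≠ k := by
        intro h; apply hc; subst h; simp [hk]
      have hclt : c < k := lt_of_le_of_ne hck hcne
      apply ih (c + 1) (pvFibNat c)
      · have : c + 1 + fuel = c + (fuel + 1) := by omega
        rw [this]; exact hfuel
      · have := pvFib_mono (le_of_lt hclt)
        omega
      · omega

-- when end_fibo < number no difference can match, the inner loop returns false
theorem pvSearch_false (number F : Int) (h : F < number) :
    ∀ (fuel : Nat) (s : Int) (c : Nat), pvSearchLoop number F s c fuel = false := by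
  intro fuel
  induction fuel with
  | zero => intro s c; simp [pvSearchLoop]
  | succ fuel ih =>
    intro s c
    simp only [pvSearchLoop, pvGet_natCast]
    split
    · rw [if_neg, ih]
      have := pvFib_nonneg c
      simp; omega
    · rfl

theorem pvOuter_exit (number : Int) (c : Nat) (e : Int) (h : ¬ e < number) :
    ∀ fuel, pvOuterLoop number c e fuel = false := by
  intro fuel
  cases fuel with
  | zero => rfl
  | succ fuel => simp [pvOuterLoop, h]

-- lockstep: A's outer loop at counter c equals B's loop from state (fib c, fib (c+1))
-- followed by Source B's final membership test, given the set-invariant for fibs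
theorem pvLockstep (number : Int) (hn : 1 ≤ number) :
    ∀ (fuel : Nat) (c : Nat) (fibs : PySem.Set Int),
      pvFibNat c < number →
      number ≤ pvFibNat (c + fuel) →
      (∀ x : Int, x ∈ fibs ↔ ∃ k ≤ c, pvFibNat k = x) →
      pvOuterLoop number c (pvFibNat c) fuel =
        (let r := pvFibLoop number fibs (pvFibNat c) (pvFibNat (c + 1)) fuel
         PySem.Set.contains (PySem.Set.add r.2 r.1) (r.1 - number)) := by
  intro fuel
  induction fuel with
  | zero =>
    intro c fibs hc hfuel hinv
    exfalso
    simp only [Nat.add_zero] at hfuel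
    omega
  | succ fuel ih =>
    intro c fibs hc hfuel hinv
    simp only [pvOuterLoop, pvFibLoop, pvGet_natCast]
    rw [if_pos hc]
    by_cases hb : pvFibNat (c + 1) < number
    · -- both loops take another step
      rw [if_pos hb]
      rw [pvSearch_false number _ hb]
      have hsum : pvFibNat c + pvFibNat (c + 1) = pvFibNat (c + 2) := by
        show _ = pvFibNat (c + 1) + pvFibNat c; ring
      rw [hsum]
      apply ih (c + 1) (PySem.Set.add fibs (pvFibNat (c + 1))) hb
      · have : c + 1 + fuel = c + (fuel + 1) := by omega
        rw [this]; exact hfuel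
      · intro x
        rw [PySem.Set.mem_add, hinv]
        constructor
        · rintro (⟨k, hk, he⟩ | he)
          · exact ⟨k, by omega, he⟩
          · exact ⟨c + 1, le_refl _, he.symm⟩
        · rintro ⟨k, hk, he⟩
          rcases Nat.lt_or_ge k (c + 1) with h' | h'
          · exact Or.inl ⟨k, by omega, he⟩
          · have : k = c + 1 := by omega
            subst this; exact Or.inr he.symm
    · -- final step: A runs its search on F = fib (c+1); B exits and does the lookup
      rw [if_neg hb]
      set F := pvFibNat (c + 1) with hF
      have hF1 : 1 ≤ F := le_trans hn (by omega)
      -- A = search result (the residual outer loop returns false)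
      have hA : ∀ fuel', pvOuterLoop number (c + 1) F fuel' = false :=
        pvOuter_exit number (c + 1) F hb
      -- the goal reduces to: search = contains
      have hgoal : pvSearchLoop number F 0 0 (F.toNat + 2) =
          PySem.Set.contains (PySem.Set.add fibs F) (F - number) := by
        have hmem : PySem.Set.contains (PySem.Set.add fibs F) (F - number) = true ↔
            (F - number ∈ fibs ∨ F - number = F) := by
          rw [PySem.Set.contains_iff, PySem.Set.mem_add]
        by_cases hs : pvSearchLoop number F 0 0 (F.toNat + 2) = true
        · rw [hs]
          obtain ⟨k, hk⟩ := pvSearch_sound number F _ _ _ hs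
          symm
          rw [hmem]
          left
          rw [hinv]
          refine ⟨k, ?_, by omega⟩
          by_contra hgt
          have : pvFibNat (c + 1) ≤ pvFibNat k := pvFib_mono (by omega)
          omega
        · rw [Bool.not_eq_true] at hs
          rw [hs]; symm
          rw [Bool.eq_false_iff, Ne, hmem]
          rintro (hin | heq)
          · rw [hinv] at hin
            obtain ⟨k, hkc, hke⟩ := hin
            have hFk : F - pvFibNat k = number := by omega
            have htrue : pvSearchLoop number F 0 0 (F.toNat + 2) = true := by
              apply pvSearch_complete number F hn k hFk
              · have e : F.toNat + 1 + 1 = F.toNat + 2 := rfl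
                have h1 := pvFib_ge (F.toNat + 1)
                rw [e] at h1
                have h2 : (F.toNat : Int) = F := Int.toNat_of_nonneg (by omega)
                simp only [Nat.zero_add]
                push_cast at h1
                omega
              · omega
              · omega
            rw [hs] at htrue
            exact Bool.false_ne_true htrue
          · omega
        -- end hgoal
      cases hsr : pvSearchLoop number F 0 0 (F.toNat + 2) with
      | true => rw [if_pos rfl] ; rw [hsr] at hgoal; exact hgoal
      | false =>
        rw [if_neg Bool.false_ne_true, hA]
        rw [hsr] at hgoal; exact hgoal

-- ===== VERDICT (by name: the statement is the Claim_ definition above) =====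
theorem look_in_fib_for_draft_spec : Claim_equal_look_in_fib_for_draft := by
  intro number _
  unfold Spec_look_in_fib_for_draft look_in_fib_for_draft look_in_fib_for_draft_alt
  rcases lt_trichotomy number 0 with hlt | heq | hgt
  · rw [if_neg (by simp; omega), if_pos (by omega)]
    rw [pvOuter_exit number 0 0 (by omega)]
    have : (number == 0) = false := by simp; omega
    rw [this]
  · simp [heq]
  · rw [if_neg (by simp; omega), if_neg (by omega)]
    have h1 : pvFibNat 0 < number := hgt
    have h2 : number ≤ pvFibNat (0 + (number.toNat + 2)) := by
      have e : number.toNat + 1 + 1 = number.toNat + 2 := rfl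
      have h := pvFib_ge (number.toNat + 1)
      rw [e] at h
      simp only [Nat.zero_add]
      push_cast at h
      omega
    have h3 : ∀ x : Int, x ∈ PySem.Set.ofList [(0 : Int)] ↔ ∃ k ≤ 0, pvFibNat k = x := by
      intro x
      rw [PySem.Set.mem_ofList]
      constructor
      · intro hx
        simp at hx
        exact ⟨0, le_refl _, by simp [pvFibNat, hx]⟩
      · rintro ⟨k, hk, he⟩
        interval_cases k
        simp [pvFibNat] at he
        simp [he.symm]
    exact pvLockstep number (by omega) (number.toNat + 2) 0 (PySem.Set.ofList [0]) h1 h2 h3
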